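-- pv_equiv track=rewrite | github.com/miliar/Code_Jam_Webscraper | solutions_python/Problem_200/3273.py | resolveDisconnect
-- ===== SOURCE A (Python) =====
-- def makeNines(fromIndex, arr):
--     for i in range(fromIndex, len(arr)):
--         arr[i] = 9
--     return arr
--
-- def resolveDisconnect(conflictingBeforeIndex, conflictingAfterIndex, arr):
--     if conflictingBeforeIndex == 0:
--         arr[conflictingBeforeIndex] -= 1
--         return makeNines(1, arr)
--
--     arr[conflictingBeforeIndex] -= 1
--
--     if checkDisconnect(conflictingBeforeIndex - 1, conflictingBeforeIndex, arr):
--         return resolveDisconnect(conflictingBeforeIndex - 1, conflictingBeforeIndex, arr)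
--     else:
--         return makeNines(conflictingAfterIndex, arr)
--
-- def checkDisconnect(beforeIndex, afterIndex, arr):
--     return arr[afterIndex] < arr[beforeIndex]
-- ===== SOURCE B (Python) =====
-- def resolveDisconnect(conflictingBeforeIndex, conflictingAfterIndex, arr):
--     before = conflictingBeforeIndex
--     after = conflictingAfterIndex
--     while True:
--         if before == 0:
--             arr[0] -= 1
--             arr[1:] = [9] * (len(arr) - 1)
--             return arr
--         arr[before] -= 1
--         if arr[before] < arr[before - 1]:
--             after = before
--             before -= 1
--         else:
--             arr[after:] = [9] * len(arr[after:])
--             return arr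
-- ===== Notes on version B (the rewrite author's own statement) =====
-- stated objective: simpler
-- what changed: Replaces A's three mutually calling functions (tail recursion through resolveDisconnect plus checkDisconnect and the index-loop makeNines) with a single self-contained while-loop that walks the borrow left with two local indices and fills the tail to nines by one slice assignment.
-- outside the precondition, e.g. on resolveDisconnect(1, -1, [1, 3]): A returns [9, 9], B returns [1, 9]; on resolveDisconnect(2, 0, [1, 2]): A raises IndexError, B raises IndexError
import Mathlib
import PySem

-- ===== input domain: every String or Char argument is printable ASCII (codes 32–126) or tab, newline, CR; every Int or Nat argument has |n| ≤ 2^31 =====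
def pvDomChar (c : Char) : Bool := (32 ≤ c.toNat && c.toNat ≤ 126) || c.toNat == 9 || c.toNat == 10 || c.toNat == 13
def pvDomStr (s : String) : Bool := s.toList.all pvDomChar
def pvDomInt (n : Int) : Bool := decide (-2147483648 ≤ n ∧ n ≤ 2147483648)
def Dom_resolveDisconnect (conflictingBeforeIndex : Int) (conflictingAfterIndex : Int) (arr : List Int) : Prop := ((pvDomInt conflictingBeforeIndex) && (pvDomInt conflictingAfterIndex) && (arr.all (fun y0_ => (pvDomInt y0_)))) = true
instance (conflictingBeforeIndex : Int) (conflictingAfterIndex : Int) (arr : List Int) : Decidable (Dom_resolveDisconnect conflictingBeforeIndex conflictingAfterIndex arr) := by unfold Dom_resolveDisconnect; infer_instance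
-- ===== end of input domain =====

-- B replaces A's three mutually calling functions by one self-contained loop with two
-- local indices and a slice-assignment nine-fill (objective: simpler). Both Pythons
-- mutate `arr` in place identically on the stated domain and return the same object;
-- the theorems here are about the returned value.

-- ===== PORT A =====
-- cited by the ports' decreasing_by: a successful Python index read implies the index is in wrap range
theorem pyGet?_some_bounds (xs : List Int) (i : Int) (v : Int)
    (h : PySem.List.pyGet? xs i = some v) : -xs.length ≤ i ∧ i < xs.length := by
  simp [PySem.List.pyGet?, PySem.List.pyIdx?] at h
  split_ifs at h with h1 h2 <;> first | (simp at h; omega) | simp_all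

def checkDisconnect (beforeIndex : Int) (afterIndex : Int) (arr : List Int) : Bool :=
  -- arr[afterIndex] < arr[beforeIndex]; indices are in range under Pre_ (pyGetD is exact there)
  decide (PySem.List.pyGetD arr afterIndex 0 < PySem.List.pyGetD arr beforeIndex 0)

def makeNines (fromIndex : Int) (arr : List Int) : List Int :=
  (PySem.List.pyRange fromIndex arr.length 1).foldl (fun a i => PySem.List.pySetD a i 9) arr

def resolveDisconnect (conflictingBeforeIndex : Int) (conflictingAfterIndex : Int) (arr : List Int) : List Int :=
  if conflictingBeforeIndex = 0 then
    match PySem.List.pyGet? arr conflictingBeforeIndex with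
    | none => arr   -- IndexError in Python (outside Pre_)
    | some v => makeNines 1 (PySem.List.pySetD arr conflictingBeforeIndex (v - 1))
  else
    match h : PySem.List.pyGet? arr conflictingBeforeIndex with
    | none => arr   -- IndexError in Python (outside Pre_)
    | some v =>
      let arr2 := PySem.List.pySetD arr conflictingBeforeIndex (v - 1)
      if checkDisconnect (conflictingBeforeIndex - 1) conflictingBeforeIndex arr2 then
        resolveDisconnect (conflictingBeforeIndex - 1) conflictingBeforeIndex arr2
      else
        makeNines conflictingAfterIndex arr2
termination_by (conflictingBeforeIndex + arr.length + 1).toNat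
decreasing_by
  have hb := pyGet?_some_bounds arr conflictingBeforeIndex v h
  simp only [PySem.List.length_pySetD]
  omega

-- ===== PORT B =====
def resolveLoop (before : Int) (after : Int) (arr : List Int) : List Int :=
  if before = 0 then
    match PySem.List.pyGet? arr 0 with
    | none => arr   -- IndexError in Python (outside Pre_)
    | some v =>
      let arr2 := PySem.List.pySetD arr 0 (v - 1)
      -- arr[1:] = [9] * (len(arr) - 1)
      PySem.List.slice arr2 none (some 1) ++ List.replicate (arr2.length - 1) 9
  else
    match h : PySem.List.pyGet? arr before with
    | none => arr   -- IndexError in Python (outside Pre_)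
    | some v =>
      let arr2 := PySem.List.pySetD arr before (v - 1)
      if PySem.List.pyGetD arr2 before 0 < PySem.List.pyGetD arr2 (before - 1) 0 then
        resolveLoop (before - 1) before arr2
      else
        -- arr[after:] = [9] * len(arr[after:])
        PySem.List.slice arr2 none (some after) ++
          List.replicate (PySem.List.slice arr2 (some after) none).length 9
termination_by (before + arr.length + 1).toNat
decreasing_by
  have hb := pyGet?_some_bounds arr before v h
  simp only [PySem.List.length_pySetD]
  omega

def resolveDisconnect_alt (conflictingBeforeIndex : Int) (conflictingAfterIndex : Int) (arr : List Int) : List Int :=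
  resolveLoop conflictingBeforeIndex conflictingAfterIndex arr

-- ===== PRECONDITION & SPEC =====
-- Pre_ restricts to the function's natural domain: 0 ≤ conflictingBeforeIndex < len(arr) and
-- 0 ≤ conflictingAfterIndex. Outside it Python's negative-index wraparound makes A's behaviour
-- (an IndexError, or a wrap-filled array) accidental rather than specified.
def Pre_resolveDisconnect (conflictingBeforeIndex : Int) (conflictingAfterIndex : Int) (arr : List Int) : Prop :=
  0 ≤ conflictingBeforeIndex ∧ conflictingBeforeIndex < arr.length ∧ 0 ≤ conflictingAfterIndex
instance (conflictingBeforeIndex : Int) (conflictingAfterIndex : Int) (arr : List Int) : Decidable (Pre_resolveDisconnect conflictingBeforeIndex conflictingAfterIndex arr) := by unfold Pre_resolveDisconnect; infer_instance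

def pvWitness_resolveDisconnect : Int × Int × List Int := (1, 1, [1, 3])

def Spec_resolveDisconnect (conflictingBeforeIndex : Int) (conflictingAfterIndex : Int) (arr : List Int) (out : List Int) : Prop := out = resolveDisconnect_alt conflictingBeforeIndex conflictingAfterIndex arr
instance (conflictingBeforeIndex : Int) (conflictingAfterIndex : Int) (arr : List Int) (out : List Int) : Decidable (Spec_resolveDisconnect conflictingBeforeIndex conflictingAfterIndex arr out) := by unfold Spec_resolveDisconnect; infer_instance

-- ===== CLAIM (what is proved, stated in full; the proofs are below) =====
def Claim_equal_resolveDisconnect : Prop := ∀ (conflictingBeforeIndex : Int) (conflictingAfterIndex : Int) (arr : List Int), Dom_resolveDisconnect conflictingBeforeIndex conflictingAfterIndex arr → Pre_resolveDisconnect conflictingBeforeIndex conflictingAfterIndex arr → Spec_resolveDisconnect conflictingBeforeIndex conflictingAfterIndex arr (resolveDisconnect conflictingBeforeIndex conflictingAfterIndex arr)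

-- ===== LEMMAS AND PROOFS =====
-- the common normal form of both nine-fills: keep the first k entries, nines after
def mk9 (k : Nat) (xs : List Int) : List Int := xs.take k ++ List.replicate (xs.length - k) 9

theorem pyGet?_in_range (xs : List Int) (i : Int) (h : 0 ≤ i) (h2 : i < xs.length) :
    PySem.List.pyGet? xs i = some (xs.getD i.toNat 0) := by
  rw [List.getD_eq_getElem?_getD, List.getElem?_eq_getElem (show i.toNat < xs.length by omega)]
  simp [PySem.List.pyGet?, PySem.List.pyIdx?, h, h2]

theorem makeNines_eq_mk9 : ∀ (n : Nat) (k : Nat) (xs : List Int), xs.length - k = n →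
    makeNines (k : Int) xs = mk9 k xs := by
  intro n
  induction n with
  | zero =>
    intro k xs h
    have hk : xs.length ≤ k := by omega
    unfold makeNines mk9
    rw [show PySem.List.pyRange (k : Int) xs.length 1 = [] by
      simp [PySem.List.pyRange]; intro; omega]
    simp [List.take_of_length_le hk, Nat.sub_eq_zero_of_le hk]
  | succ n ih =>
    intro k xs h
    have hk : k < xs.length := by omega
    unfold makeNines
    rw [PySem.List.pyRange_one_cons (by exact_mod_cast hk)]
    simp only [List.foldl_cons, PySem.List.pySetD_natCast]
    have hcast : (k : Int) + 1 = ((k + 1 : Nat) : Int) := by push_cast; ring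
    have hlen : (xs.set k 9).length = xs.length := by simp
    rw [hcast, show (xs.length : Int) = ((xs.set k 9).length : Int) by rw [hlen]]
    have := ih (k + 1) (xs.set k 9) (by simp; omega)
    unfold makeNines at this
    rw [this]
    unfold mk9
    rw [hlen, List.take_add_one, List.getElem?_set_self (by omega),
      List.take_set_of_le Nat.le.refl,
      show xs.length - k = (xs.length - (k + 1)) + 1 by omega, List.replicate_succ]
    simp

theorem fillB_eq_mk9 (k : Nat) (xs : List Int) :
    PySem.List.slice xs none (some (k : Int)) ++
      List.replicate (PySem.List.slice xs (some (k : Int)) none).length 9 = mk9 k xs := by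
  simp [PySem.List.slice_to_natCast, PySem.List.slice_from_natCast, mk9]

theorem main_eq : ∀ (n : Nat) (cbi cai : Int) (arr : List Int), cbi.toNat = n →
    0 ≤ cbi → cbi < arr.length → 0 ≤ cai →
    resolveDisconnect cbi cai arr = resolveLoop cbi cai arr := by
  intro n
  induction n with
  | zero =>
    intro cbi cai arr hn h0 hlt hcai
    have hc : cbi = 0 := by omega
    subst hc
    rw [resolveDisconnect, resolveLoop]
    rw [pyGet?_in_range arr 0 le_rfl hlt]
    simp only [if_true]
    rw [show (1 : Int) = ((1 : Nat) : Int) by simp, makeNines_eq_mk9 _ 1 _ rfl, mk9,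
      PySem.List.slice_to_natCast]
  | succ n ih =>
    intro cbi cai arr hn h0 hlt hcai
    have hc : cbi ≠ 0 := by omega
    rw [resolveDisconnect, resolveLoop]
    simp only [if_neg hc]
    rw [pyGet?_in_range arr cbi h0 hlt]
    dsimp only
    simp only [checkDisconnect, decide_eq_true_eq]
    by_cases hlt2 : PySem.List.pyGetD (PySem.List.pySetD arr cbi (arr.getD cbi.toNat 0 - 1)) cbi 0 <
        PySem.List.pyGetD (PySem.List.pySetD arr cbi (arr.getD cbi.toNat 0 - 1)) (cbi - 1) 0
    · rw [if_pos hlt2, if_pos hlt2]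
      exact ih (cbi - 1) cbi _ (by omega) (by omega)
        (by rw [PySem.List.length_pySetD]; omega) h0
    · rw [if_neg hlt2, if_neg hlt2,
        show cai = ((cai.toNat : Nat) : Int) from (Int.toNat_of_nonneg hcai).symm,
        makeNines_eq_mk9 _ _ _ rfl, fillB_eq_mk9]

-- ===== VERDICT (by name: the statement is the Claim_ definition above) =====
theorem resolveDisconnect_spec : Claim_equal_resolveDisconnect := by
  intro cbi cai arr _ hpre
  unfold Spec_resolveDisconnect resolveDisconnect_alt
  exact main_eq cbi.toNat cbi cai arr rfl hpre.1 hpre.2.1 hpre.2.2
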